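-- pv_equiv track=rewrite | github.com/alekseivoroshilov/db-course-spydatabase-2021 | cursov_db/db_interface.py | format_mr
-- ===== SOURCE A (Python) =====
-- def format_mr(elements):
--     string = ""
--     i = 0
--     for elem in elements:
--         if i == 0:
--             string += "id: "
--             string += str(elem)
--             string += '\n'
--             i += 1
--             continue
--         elif i == 1:
--             string += "name: "
--             string += str(elem)
--             string += '\n'
--             i += 1
--             continue
--         elif i == 2:
--             string += "info: "
--             string += str(elem)
--             string += '\n'
--             i += 1
--             continue
--         elif i == 3:
--             string += "time: "
--             string += str(elem)
--             string += '\n\n'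
--             i = 0
--             continue
--     return string
-- ===== SOURCE B (Python) =====
-- def format_mr(elements):
--     labels = ("id: ", "name: ", "info: ", "time: ")
--     # stage 1: group the elements into records of (up to) 4
--     records, cur = [], []
--     for e in elements:
--         cur.append(e)
--         if len(cur) == 4:
--             records.append(cur)
--             cur = []
--     if cur:
--         records.append(cur)
--     # stage 2: format each record by zipping it with the labels;
--     # only a complete record gets the trailing blank line
--     def fmt(rec):
--         s = "".join(lab + str(e) + "\n" for lab, e in zip(labels, rec))
--         return s + "\n" if len(rec) == 4 else s
--     return "".join(fmt(r) for r in records)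
-- ===== Notes on version B (the rewrite author's own statement) =====
-- stated objective: alternative
-- what changed: Replaced A's single stateful pass with a mod-4 counter and a 4-way if/elif cascade appending to one string by a staged decomposition: a first pass groups the elements into records of up to 4, then each record is formatted by zipping it with the label tuple (zip truncation handles the partial trailing record, only complete records get the blank line) and the record strings are joined.
import Mathlib
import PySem

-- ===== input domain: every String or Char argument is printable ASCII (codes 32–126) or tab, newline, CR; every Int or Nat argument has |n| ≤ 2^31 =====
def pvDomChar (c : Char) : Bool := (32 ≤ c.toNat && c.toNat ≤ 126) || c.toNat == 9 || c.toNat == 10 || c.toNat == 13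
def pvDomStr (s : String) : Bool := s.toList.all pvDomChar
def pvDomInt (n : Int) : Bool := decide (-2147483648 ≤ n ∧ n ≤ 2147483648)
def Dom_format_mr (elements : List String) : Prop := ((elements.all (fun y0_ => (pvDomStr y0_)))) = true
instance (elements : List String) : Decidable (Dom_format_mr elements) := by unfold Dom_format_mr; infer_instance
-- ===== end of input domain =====

-- header: B replaces A's stateful counter/if-elif single pass by two staged passes — group the
-- elements into records of up to 4, then format each record by zipping it with the label list
-- and join — an alternative decomposition, same output.

-- ===== PORT A =====
def formatLoopA : List String → String → Nat → String
  | [], acc, _ => acc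
  | e :: rest, acc, i =>
    if i = 0 then formatLoopA rest (acc ++ "id: " ++ e ++ "\n") (i + 1)
    else if i = 1 then formatLoopA rest (acc ++ "name: " ++ e ++ "\n") (i + 1)
    else if i = 2 then formatLoopA rest (acc ++ "info: " ++ e ++ "\n") (i + 1)
    else if i = 3 then formatLoopA rest (acc ++ "time: " ++ e ++ "\n\n") 0
    else formatLoopA rest acc i

def format_mr (elements : List String) : String := formatLoopA elements "" 0

-- ===== PORT B =====
def pvLabelsB : List String := ["id: ", "name: ", "info: ", "time: "]

-- stage 1 of Source B: the grouping loop over the elements (state: records so far, current record)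
def chunkLoopB : List String → List (List String) → List String →
    List (List String) × List String
  | [], recs, cur => (recs, cur)
  | e :: rest, recs, cur =>
    let cur2 := cur ++ [e]
    if cur2.length = 4 then chunkLoopB rest (recs ++ [cur2]) []
    else chunkLoopB rest recs cur2

-- the 'if cur: records.append(cur)' finish of stage 1
def chunkFinishB (p : List (List String) × List String) : List (List String) :=
  if p.2.isEmpty then p.1 else p.1 ++ [p.2]

-- stage 2 of Source B: fmt(rec)
def fmtB (rec : List String) : String :=
  let s := PySem.Str.join "" ((pvLabelsB.zip rec).map (fun p => p.1 ++ p.2 ++ "\n"))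
  if rec.length = 4 then s ++ "\n" else s

def format_mr_alt (elements : List String) : String :=
  PySem.Str.join "" ((chunkFinishB (chunkLoopB elements [] [])).map fmtB)

-- ===== PRECONDITION & SPEC =====
def Spec_format_mr (elements : List String) (out : String) : Prop := out = format_mr_alt elements
instance (elements : List String) (out : String) : Decidable (Spec_format_mr elements out) := by unfold Spec_format_mr; infer_instance

-- ===== CLAIM (what is proved, stated in full; the proofs are below) =====
def Claim_equal_format_mr : Prop := ∀ (elements : List String), Dom_format_mr elements → Spec_format_mr elements (format_mr elements)

-- ===== LEMMAS AND PROOFS =====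
lemma joinEmpty_cons (s : String) (l : List String) :
    PySem.Str.join "" (s :: l) = s ++ PySem.Str.join "" l := by
  cases l <;>
    simp [PySem.Str.join, PySem.Chars.join_cons_cons, PySem.Chars.join_singleton,
      PySem.Chars.join_nil]

lemma joinEmpty_nil : PySem.Str.join "" ([] : List String) = "" := by decide

-- the partial text A has already emitted for a pending record cur
def pvPartial (cur : List String) : String :=
  PySem.Str.join "" ((pvLabelsB.zip cur).map (fun p => p.1 ++ p.2 ++ "\n"))

-- the records accumulator is a pure prefix of chunkLoopB's result
lemma chunkLoopB_recs : ∀ (xs : List String) (r : List String) (recs : List (List String))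
    (cur : List String),
    chunkLoopB xs (r :: recs) cur =
      ((chunkLoopB xs recs cur).1.cons r, (chunkLoopB xs recs cur).2) := by
  intro xs
  induction xs with
  | nil => intro r recs cur; simp [chunkLoopB]
  | cons e rest ih =>
    intro r recs cur
    simp only [chunkLoopB]
    split
    · rw [show (r :: recs) ++ [cur ++ [e]] = r :: (recs ++ [cur ++ [e]]) from rfl, ih]
    · rw [ih]

-- main invariant: A's loop at counter cur.length, with the partial record text already in acc,
-- produces exactly B's remaining records
lemma main_eq : ∀ (xs cur : List String) (acc : String), cur.length < 4 →
    formatLoopA xs (acc ++ pvPartial cur) cur.length =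
      acc ++ PySem.Str.join "" ((chunkFinishB (chunkLoopB xs [] cur)).map fmtB) := by
  intro xs
  induction xs with
  | nil =>
    intro cur acc hlen
    cases cur with
    | nil => simp [formatLoopA, chunkLoopB, chunkFinishB, pvPartial, pvLabelsB, joinEmpty_nil]
    | cons a t =>
      simp only [formatLoopA, chunkLoopB, chunkFinishB, List.isEmpty_cons, Bool.false_eq_true,
        if_false, List.nil_append, List.map_cons, List.map_nil, joinEmpty_cons, joinEmpty_nil]
      rw [fmtB, if_neg (by omega)]
      simp [pvPartial]
  | cons e rest ih =>
    intro cur acc hlen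
    match cur, hlen with
    | [], _ =>
      have h1 : acc ++ pvPartial [] ++ "id: " ++ e ++ "\n" = acc ++ pvPartial [e] := by
        simp [pvPartial, pvLabelsB, joinEmpty_cons, joinEmpty_nil, String.append_assoc]
      have := ih [e] acc (by simp)
      simp only [formatLoopA, List.length_nil, h1, chunkLoopB]
      simpa [chunkLoopB] using this
    | [a1], _ =>
      have h1 : acc ++ pvPartial [a1] ++ "name: " ++ e ++ "\n" = acc ++ pvPartial [a1, e] := by
        simp [pvPartial, pvLabelsB, joinEmpty_cons, joinEmpty_nil, String.append_assoc]
        simp [← String.append_assoc]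
      have := ih [a1, e] acc (by simp)
      simp only [formatLoopA, List.length_cons, List.length_nil] at *
      norm_num at *
      rw [h1, this]
      simp [chunkLoopB]
    | [a1, a2], _ =>
      have h1 : acc ++ pvPartial [a1, a2] ++ "info: " ++ e ++ "\n"
          = acc ++ pvPartial [a1, a2, e] := by
        simp [pvPartial, pvLabelsB, joinEmpty_cons, joinEmpty_nil, String.append_assoc]
        simp [← String.append_assoc]
      have := ih [a1, a2, e] acc (by simp)
      simp only [formatLoopA, List.length_cons, List.length_nil] at *
      norm_num at *
      rw [h1, this]
      simp [chunkLoopB]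
    | [a1, a2, a3], _ =>
      have hfmt : fmtB [a1, a2, a3, e] = pvPartial [a1, a2, a3] ++ "time: " ++ e ++ "\n\n" := by
        rw [fmtB, if_pos (by simp)]
        simp [pvPartial, pvLabelsB, joinEmpty_cons, joinEmpty_nil, String.append_assoc]
        simp [← String.append_assoc]
      have := ih [] (acc ++ fmtB [a1, a2, a3, e]) (by simp)
      simp only [formatLoopA, List.length_cons, List.length_nil] at *
      norm_num at *
      rw [show chunkLoopB (e :: rest) [] [a1, a2, a3] = chunkLoopB rest [[a1, a2, a3, e]] [] from by
        simp [chunkLoopB]]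
      rw [show chunkLoopB rest [[a1, a2, a3, e]] [] =
            ((chunkLoopB rest [] []).1.cons [a1, a2, a3, e], (chunkLoopB rest [] []).2) from
          chunkLoopB_recs rest _ [] []]
      rw [show chunkFinishB ((chunkLoopB rest [] []).1.cons [a1, a2, a3, e],
            (chunkLoopB rest [] []).2)
          = [a1, a2, a3, e] :: chunkFinishB (chunkLoopB rest [] []) from by
        unfold chunkFinishB; split <;> simp_all]
      rw [List.map_cons, joinEmpty_cons]
      have h2 : acc ++ pvPartial [a1, a2, a3] ++ "time: " ++ e ++ "\n\n"
          = acc ++ fmtB [a1, a2, a3, e] ++ pvPartial [] := by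
        simp [hfmt, pvPartial, pvLabelsB, joinEmpty_nil, String.append_assoc]
      rw [h2, this, hfmt]
      simp [pvPartial, pvLabelsB, String.append_assoc]

-- ===== VERDICT (by name: the statement is the Claim_ definition above) =====
theorem format_mr_spec : Claim_equal_format_mr := by
  intro elements _
  unfold Spec_format_mr format_mr format_mr_alt
  have h := main_eq elements [] "" (by simp)
  simpa [pvPartial, pvLabelsB, joinEmpty_nil] using h
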